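-- pv_equiv track=rewrite | github.com/lieblichoi/algorithm | programmers/python/2018_kakao_blind_musicinfo.py | solution
-- ===== SOURCE A (Python) =====
-- import math
--
-- def replace_step(m):
--     return m.replace("C#", "c").replace("D#", "d").replace("F#", "f").replace("G#", "g").replace("A#", "a")
--
-- def solution(m, musicinfos):
--     answer = None
--     max_play_time = 0
--     m = replace_step(m)
--
--     for musicinfo in musicinfos:
--         start_time, end_time, name, melody = musicinfo.split(",")
--         play_time = int(end_time[:2]) * 60 + int(end_time[3:]) - int(start_time[:2]) * 60 - int(start_time[3:])
--
--         melody = replace_step(melody)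
--
--         # ABC(3) 라는 melody 가 16초 진행
--         # 5번 + 1 -> 6번 반복
--         # 올림(실행시간 / 멜로디 길이)
--         # ABCABCABCABCABCABC
--         # ..............16
--
--         melody_repeated_count = math.ceil(play_time/ len(melody))
--         melody_played = (melody * melody_repeated_count)[:play_time]
--
--         if m in melody_played and play_time > max_play_time:
--             answer = name
--             max_play_time = play_time
-- # 자신이 들은 멜로디가 포함되어 있는 음악 중 재생 시간이 제일 긴 음악 제목
--     if answer is None:
--         return "(None)"
--
--     return answer
-- ===== SOURCE B (Python) =====
-- def normalize(s):
--     # collapse each sharp note to one lower-case character in a single pass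
--     out = []
--     i = 0
--     while i < len(s):
--         if i + 1 < len(s) and s[i + 1] == '#':
--             out.append(s[i].lower())
--             i += 2
--         else:
--             out.append(s[i])
--             i += 1
--     return ''.join(out)
--
--
-- def cyclic_match(tune, mel, play_time):
--     # tune occurs in the track iff it occurs starting at some offset i < len(mel)
--     # of the infinite repetition of mel, ending within play_time seconds
--     L = len(mel)
--     k = len(tune)
--     return any(all(mel[(i + j) % L] == tune[j] for j in range(k))
--                for i in range(min(L, play_time - k + 1)))
--
--
-- def solution(m, musicinfos):
--     tune = normalize(m)
--     matches = []
--     for musicinfo in musicinfos: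
--         start_time, end_time, name, melody = musicinfo.split(",")
--         play_time = int(end_time[:2]) * 60 + int(end_time[3:]) \
--             - int(start_time[:2]) * 60 - int(start_time[3:])
--         mel = normalize(melody)
--         if play_time > 0 and cyclic_match(tune, mel, play_time):
--             matches.append((play_time, name))
--     if not matches:
--         return "(None)"
--     best = matches[0]
--     for cand in matches[1:]:
--         if best[0] < cand[0]:
--             best = cand
--     return best[1]
-- ===== Notes on version B (the rewrite author's own statement) =====
-- stated objective: alternative
-- what changed: B never builds the repeated-and-truncated song or calls the substring operator: it tests containment arithmetically on the cyclic melody via modular indexing (offset i < len(mel), i+len(tune) <= play_time), collapses sharps in one left-to-right pass instead of five chained replace() calls, and collects all matching (play_time, name) pairs first, selecting the first maximum in a second stage instead of A's in-loop running max.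
-- outside the precondition, e.g. on solution('B', ['01:00,01:02,tune,B#']): A returns 'tune', B returns '(None)'
import Mathlib
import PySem

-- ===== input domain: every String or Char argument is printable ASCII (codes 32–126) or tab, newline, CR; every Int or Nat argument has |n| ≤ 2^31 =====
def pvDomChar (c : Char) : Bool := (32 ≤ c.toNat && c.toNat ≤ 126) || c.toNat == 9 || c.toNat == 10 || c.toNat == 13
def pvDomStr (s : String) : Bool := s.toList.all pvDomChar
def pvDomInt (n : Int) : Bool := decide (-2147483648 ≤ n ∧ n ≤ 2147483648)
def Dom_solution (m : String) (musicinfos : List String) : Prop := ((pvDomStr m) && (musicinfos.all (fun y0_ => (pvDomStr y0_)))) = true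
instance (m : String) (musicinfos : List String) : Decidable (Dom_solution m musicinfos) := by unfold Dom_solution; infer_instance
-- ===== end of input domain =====

-- B tests containment by modular indexing into the cyclic melody (never building the repeated
-- truncated string), collapses sharps in one pass, and collects all matches before selecting the
-- first maximum (alternative algorithm, same order of cost); return values proved equal on Pre_.

-- ===== PORT A =====

-- replace_step: the five s.replace(…) calls, in A's order
def replaceStepL (s : List Char) : List Char :=
  PySem.Chars.replace (PySem.Chars.replace (PySem.Chars.replace (PySem.Chars.replace
    (PySem.Chars.replace s ['C', '#'] ['c']) ['D', '#'] ['d']) ['F', '#'] ['f']) ['G', '#'] ['g']) ['A', '#'] ['a']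

-- loop body of A (one musicinfo); m' is the already-replaced heard tune
def stepA (m' : List Char) (st : Option String × Int) (info : String) : Option String × Int :=
  match (PySem.Str.split? info ",").getD [] with
  | [startT, endT, _name, melody] =>
    let playTime : Int :=
      (PySem.Int.ofChars? (PySem.List.slice endT.toList none (some 2))).getD 0 * 60
      + (PySem.Int.ofChars? (PySem.List.slice endT.toList (some 3) none)).getD 0
      - (PySem.Int.ofChars? (PySem.List.slice startT.toList none (some 2))).getD 0 * 60
      - (PySem.Int.ofChars? (PySem.List.slice startT.toList (some 3) none)).getD 0
    let mel := replaceStepL melody.toList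
    -- math.ceil(play_time / len(melody)) ported as the exact integer ceiling -((-p) // n):
    -- equal to Python's float-based ceil for the MM:SS-bounded play times Pre_ admits
    let cnt : Int := -(PySem.Int.floordiv (-playTime) (mel.length : Int))
    let played := PySem.List.slice (PySem.List.pyRepeat mel cnt) none (some playTime)
    if PySem.Chars.isIn m' played && decide (st.2 < playTime) then (some _name, playTime) else st
  | _ => st  -- a non-4-field musicinfo makes Python's unpacking raise: outside Pre_

def solution (m : String) (musicinfos : List String) : String :=
  match (musicinfos.foldl (stepA (replaceStepL m.toList)) (none, 0)).1 with
  | none => "(None)"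
  | some name => name

-- ===== PORT B =====

-- normalize: one left-to-right pass, 'X#' becomes the one lower-case char X.lower()
def normB : List Char → List Char
  | [] => []
  | a :: r =>
    match r with
    | [] => [a]
    | b :: r' => if b = '#' then PySem.Chars.lowerChar a :: normB r' else a :: normB (b :: r')

-- cyclic_match: any/all scan by modular indexing; mel[(i+j) % L] == tune[j]
def cyclicOcc (tune mel : List Char) (playTime : Int) : Bool :=
  (PySem.List.pyRange 0 (min (mel.length : Int) (playTime - (tune.length : Int) + 1)) 1).any fun i =>
    (PySem.List.pyRange 0 (tune.length : Int) 1).all fun j =>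
      PySem.List.pyGet? mel (PySem.Int.mod (i + j) (mel.length : Int)) == PySem.List.pyGet? tune j

-- loop body of B's first stage: append the (play_time, name) of a matching track
def stepM (tune : List Char) (acc : List (Int × String)) (info : String) : List (Int × String) :=
  match (PySem.Str.split? info ",").getD [] with
  | [startT, endT, _name, melody] =>
    let playTime : Int :=
      (PySem.Int.ofChars? (PySem.List.slice endT.toList none (some 2))).getD 0 * 60
      + (PySem.Int.ofChars? (PySem.List.slice endT.toList (some 3) none)).getD 0
      - (PySem.Int.ofChars? (PySem.List.slice startT.toList none (some 2))).getD 0 * 60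
      - (PySem.Int.ofChars? (PySem.List.slice startT.toList (some 3) none)).getD 0
    let mel := normB melody.toList
    if decide (0 < playTime) && cyclicOcc tune mel playTime then acc ++ [(playTime, _name)] else acc
  | _ => acc

def solution_alt (m : String) (musicinfos : List String) : String :=
  match musicinfos.foldl (stepM (normB m.toList)) [] with
  | [] => "(None)"
  | h :: t => (t.foldl (fun best cand => if best.1 < cand.1 then cand else best) h).2

-- ===== PRECONDITION & SPEC =====

def sharpableB (c : Char) : Bool := c == 'C' || c == 'D' || c == 'F' || c == 'G' || c == 'A'
def noteCharB (c : Char) : Bool := sharpableB c || c == 'B' || c == 'E'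
-- a well-formed melody: chars are notes or '#', no leading '#', '#' only right after a sharpable note
def notesOkB (cs : List Char) : Bool :=
  cs.all (fun c => noteCharB c || c == '#') &&
  (cs.head? != some '#') &&
  (cs.zip cs.tail).all (fun p => p.2 != '#' || sharpableB p.1)
-- a canonical MM:SS time field (two digits, ':', two digits)
def timeOkB (t : String) : Bool :=
  match t.toList with
  | [a, b, c, d, e] => a.isDigit && b.isDigit && c == ':' && d.isDigit && e.isDigit
  | _ => false
def infoOkB (info : String) : Bool :=
  match (PySem.Str.split? info ",").getD [] with
  | [s, e, _, mel] => timeOkB s && timeOkB e && !(mel == "") && notesOkB mel.toList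
  | _ => false

-- Pre_ is the problem's natural domain: each musicinfo has exactly 4 comma-fields with canonical
-- MM:SS times and a nonempty well-formed melody, and (unless the track list is empty, where the
-- tune is never read) the heard tune is a well-formed note string too.  Outside it A raises (bad
-- field count, unparseable int, empty melody divides by zero), or its char-collapse reads non-note
-- text such as "B#" as two chars, or Python's lenient int() admits huge play times on which A's
-- float-based math.ceil can misround.
def Pre_solution (m : String) (musicinfos : List String) : Prop :=
  (musicinfos = [] ∨ notesOkB m.toList = true) ∧ musicinfos.all infoOkB = true
instance (m : String) (musicinfos : List String) : Decidable (Pre_solution m musicinfos) := by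
  unfold Pre_solution; infer_instance

def pvWitness_solution : String × List String :=
  ("CDE", ["01:05,01:35,WORLD,ABC#", "01:00,01:59,HELLO,CDEFGAB"])

def Spec_solution (m : String) (musicinfos : List String) (out : String) : Prop := out = solution_alt m musicinfos
instance (m : String) (musicinfos : List String) (out : String) : Decidable (Spec_solution m musicinfos out) := by
  unfold Spec_solution; infer_instance

-- ===== CLAIM (what is proved, stated in full; the proofs are below) =====
def Claim_equal_solution : Prop := ∀ (m : String) (musicinfos : List String), Dom_solution m musicinfos → Pre_solution m musicinfos → Spec_solution m musicinfos (solution m musicinfos)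

-- ===== LEMMAS AND PROOFS =====

-- ---- the replace chain equals the one-pass normalizer on well-formed note strings ----

def scan2 (X x : Char) : List Char → List Char
  | [] => []
  | [c] => [c]
  | a :: b :: r => if a = X ∧ b = '#' then x :: scan2 X x r else a :: scan2 X x (b :: r)
termination_by l => l.length

lemma scan2_nil (X x : Char) : scan2 X x [] = [] := by simp [scan2]

lemma scan2_sharp (X x : Char) (r : List Char) :
    scan2 X x (X :: '#' :: r) = x :: scan2 X x r := by
  simp [scan2]

lemma scan2_cons (X x c : Char) (t : List Char) (h : c = X → t.head? ≠ some '#') :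
    scan2 X x (c :: t) = c :: scan2 X x t := by
  cases t with
  | nil => simp [scan2]
  | cons b r =>
    have hb : ¬ (c = X ∧ b = '#') := by
      rintro ⟨rfl, rfl⟩; exact h rfl rfl
    simp [scan2, hb]

lemma scan2_cons_ne (X x c : Char) (t : List Char) (h : c ≠ X) :
    scan2 X x (c :: t) = c :: scan2 X x t := scan2_cons _ _ _ _ (fun hh => absurd hh h)

lemma scan2_head (X x : Char) (cs : List Char) (h : cs.head? ≠ some '#') (hx : x ≠ '#') :
    (scan2 X x cs).head? ≠ some '#' := by
  match cs with
  | [] => simp [scan2]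
  | [c] => simpa [scan2] using h
  | a :: b :: r =>
    simp only [scan2]
    split
    · simpa using hx
    · simpa using (by simpa using h)

lemma replace_go_spec (X x : Char) (fuel : Nat) (l acc : List Char) (h : l.length ≤ fuel) :
    PySem.Chars.replace.go [X, '#'] [x] fuel l acc = acc.reverse ++ scan2 X x l := by
  induction fuel generalizing l acc with
  | zero =>
    have : l = [] := by cases l <;> simp_all
    subst this
    rw [PySem.Chars.replace.go.eq_def]
    simp [scan2]
  | succ fuel ih =>
    match l with
    | [] => rw [PySem.Chars.replace.go.eq_def]; simp [scan2]
    | [c] =>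
      rw [PySem.Chars.replace.go.eq_def]
      have : ¬ ([X, '#'].isPrefixOf [c] = true) := by
        simp [List.isPrefixOf]
      simp only [this, ite_false]
      rw [ih [] (c :: acc) (by simp)]
      simp [scan2]
    | c :: b :: r =>
      rw [PySem.Chars.replace.go.eq_def]
      by_cases hm : c = X ∧ b = '#'
      · obtain ⟨rfl, rfl⟩ := hm
        have hpf : [c, '#'].isPrefixOf (c :: '#' :: r) = true := by
          simp [List.isPrefixOf]
        simp only [hpf, if_true, ite_true]
        show PySem.Chars.replace.go [c,'#'] [x] fuel (List.drop 2 (c :: '#' :: r)) ([x].reverse ++ acc) = _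
        simp only [List.drop_succ_cons, List.drop_zero]
        rw [ih r ([x].reverse ++ acc) (by simp at h ⊢; omega)]
        simp [scan2]
      · have hpf : ¬ ([X, '#'].isPrefixOf (c :: b :: r) = true) := by
          simp [List.isPrefixOf]
          intro h1 h2; exact hm ⟨h1.symm, h2.symm⟩
        simp only [hpf, ite_false]
        rw [ih (b :: r) (c :: acc) (by simp at h ⊢; omega)]
        rw [scan2_cons X x c (b :: r) (by rintro rfl hh; simp at hh; exact hm ⟨rfl, hh⟩)]
        simp

lemma replace_eq_scan2 (X x : Char) (s : List Char) :
    PySem.Chars.replace s [X, '#'] [x] = scan2 X x s := by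
  rw [PySem.Chars.replace]
  have : ([X, '#'].isEmpty) = false := by simp
  rw [this]
  simp only [Bool.false_eq_true, if_false]
  exact replace_go_spec X x s.length s [] (le_refl _)

lemma replaceStepL_eq (s : List Char) : replaceStepL s =
    scan2 'A' 'a' (scan2 'G' 'g' (scan2 'F' 'f' (scan2 'D' 'd' (scan2 'C' 'c' s)))) := by
  simp [replaceStepL, replace_eq_scan2]

lemma notesOk_head (cs : List Char) (h : notesOkB cs = true) : cs.head? ≠ some '#' := by
  cases cs with
  | nil => simp
  | cons a r =>
    simp only [notesOkB, Bool.and_eq_true, bne_iff_ne] at h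
    simpa using h.1.2

lemma notesOk_cons_sharp (a : Char) (r : List Char) (h : notesOkB (a :: '#' :: r) = true) :
    sharpableB a = true ∧ notesOkB r = true := by
  cases r with
  | nil => simp_all [notesOkB]
  | cons c r' => simp_all [notesOkB]; tauto

lemma notesOk_cons_plain (a : Char) (r : List Char) (h : notesOkB (a :: r) = true)
    (hr : r.head? ≠ some '#') : noteCharB a = true ∧ notesOkB r = true := by
  cases r with
  | nil => simp_all [notesOkB]; tauto
  | cons c r' => simp_all [notesOkB]

lemma sharpable_cases (a : Char) (h : sharpableB a = true) :
    a = 'C' ∨ a = 'D' ∨ a = 'F' ∨ a = 'G' ∨ a = 'A' := by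
  simp [sharpableB] at h; tauto

def sharpLower (a : Char) : Char :=
  if a = 'C' then 'c' else if a = 'D' then 'd' else if a = 'F' then 'f'
  else if a = 'G' then 'g' else if a = 'A' then 'a' else a

lemma chain_cons_sharp (a : Char) (r : List Char) (ha : sharpableB a = true)
    (hr : r.head? ≠ some '#') :
    replaceStepL (a :: '#' :: r) = sharpLower a :: replaceStepL r := by
  rcases sharpable_cases a ha with rfl | rfl | rfl | rfl | rfl
  · rw [replaceStepL_eq, replaceStepL_eq, scan2_sharp,
      scan2_cons_ne 'D' 'd' 'c' _ (by decide), scan2_cons_ne 'F' 'f' 'c' _ (by decide),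
      scan2_cons_ne 'G' 'g' 'c' _ (by decide), scan2_cons_ne 'A' 'a' 'c' _ (by decide)]
    norm_num [sharpLower] <;> decide
  · rw [replaceStepL_eq, replaceStepL_eq,
      scan2_cons_ne 'C' 'c' 'D' _ (by decide), scan2_cons_ne 'C' 'c' '#' _ (by decide),
      scan2_sharp, scan2_cons_ne 'F' 'f' 'd' _ (by decide),
      scan2_cons_ne 'G' 'g' 'd' _ (by decide), scan2_cons_ne 'A' 'a' 'd' _ (by decide)]
    norm_num [sharpLower] <;> decide
  · rw [replaceStepL_eq, replaceStepL_eq,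
      scan2_cons_ne 'C' 'c' 'F' _ (by decide), scan2_cons_ne 'C' 'c' '#' _ (by decide),
      scan2_cons_ne 'D' 'd' 'F' _ (by decide), scan2_cons_ne 'D' 'd' '#' _ (by decide),
      scan2_sharp, scan2_cons_ne 'G' 'g' 'f' _ (by decide), scan2_cons_ne 'A' 'a' 'f' _ (by decide)]
    norm_num [sharpLower] <;> decide
  · rw [replaceStepL_eq, replaceStepL_eq,
      scan2_cons_ne 'C' 'c' 'G' _ (by decide), scan2_cons_ne 'C' 'c' '#' _ (by decide),
      scan2_cons_ne 'D' 'd' 'G' _ (by decide), scan2_cons_ne 'D' 'd' '#' _ (by decide),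
      scan2_cons_ne 'F' 'f' 'G' _ (by decide), scan2_cons_ne 'F' 'f' '#' _ (by decide),
      scan2_sharp, scan2_cons_ne 'A' 'a' 'g' _ (by decide)]
    norm_num [sharpLower] <;> decide
  · rw [replaceStepL_eq, replaceStepL_eq,
      scan2_cons_ne 'C' 'c' 'A' _ (by decide), scan2_cons_ne 'C' 'c' '#' _ (by decide),
      scan2_cons_ne 'D' 'd' 'A' _ (by decide), scan2_cons_ne 'D' 'd' '#' _ (by decide),
      scan2_cons_ne 'F' 'f' 'A' _ (by decide), scan2_cons_ne 'F' 'f' '#' _ (by decide),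
      scan2_cons_ne 'G' 'g' 'A' _ (by decide), scan2_cons_ne 'G' 'g' '#' _ (by decide),
      scan2_sharp]
    norm_num [sharpLower] <;> decide

lemma chain_cons_plain (a : Char) (r : List Char) (ha : noteCharB a = true)
    (hr : r.head? ≠ some '#') :
    replaceStepL (a :: r) = a :: replaceStepL r := by
  have h1 := scan2_head 'C' 'c' r hr (by decide)
  have h2 := scan2_head 'D' 'd' _ h1 (by decide)
  have h3 := scan2_head 'F' 'f' _ h2 (by decide)
  have h4 := scan2_head 'G' 'g' _ h3 (by decide)
  rw [replaceStepL_eq, replaceStepL_eq,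
    scan2_cons 'C' 'c' a r (fun _ => hr),
    scan2_cons 'D' 'd' a _ (fun _ => h1),
    scan2_cons 'F' 'f' a _ (fun _ => h2),
    scan2_cons 'G' 'g' a _ (fun _ => h3),
    scan2_cons 'A' 'a' a _ (fun _ => h4)]

lemma chain_eq_normB (cs : List Char) (h : notesOkB cs = true) :
    replaceStepL cs = normB cs := by
  induction cs using normB.induct with
  | case1 => rw [replaceStepL_eq]; simp [scan2_nil, normB]
  | case2 c =>
    have := notesOk_cons_plain c [] h (by simp)
    rw [chain_cons_plain c [] this.1 (by simp)]
    rw [replaceStepL_eq]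
    simp [scan2_nil, normB]
  | case3 a r ih =>
    obtain ⟨ha, hr⟩ := notesOk_cons_sharp a r h
    rw [chain_cons_sharp a r ha (notesOk_head r hr), ih hr]
    have : sharpLower a = PySem.Chars.lowerChar a := by
      rcases sharpable_cases a ha with rfl | rfl | rfl | rfl | rfl <;> decide
    simp [normB, this]
  | case4 a b r hb ih =>
    have hhead : (b :: r).head? ≠ some '#' := by simpa using hb
    obtain ⟨ha, hr⟩ := notesOk_cons_plain a (b :: r) h hhead
    rw [chain_cons_plain a (b :: r) ha hhead, ih hr]
    simp [normB, hb]

lemma normB_ne_nil (a : Char) (r : List Char) : normB (a :: r) ≠ [] := by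
  cases r with
  | nil => simp [normB]
  | cons b r' => rw [normB]; split <;> simp

-- ---- repeated melody indexes cyclically ----

lemma flatten_replicate_getElem? (mel : List Char) (n x : Nat) (h : x < n * mel.length) :
    ((List.replicate n mel).flatten)[x]? = mel[x % mel.length]? := by
  induction n generalizing x with
  | zero => simp at h
  | succ n ih =>
    rw [List.replicate_succ, List.flatten_cons]
    by_cases hx : x < mel.length
    · rw [List.getElem?_append_left hx, Nat.mod_eq_of_lt hx]
    · obtain ⟨y, rfl⟩ : ∃ y, x = mel.length + y := ⟨x - mel.length, by omega⟩
      rw [List.getElem?_append_right (by omega)]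
      simp only [Nat.add_sub_cancel_left, Nat.add_mod_left]
      exact ih y (by rw [Nat.succ_mul] at h; omega)

-- ---- infix ↔ a starting offset with pointwise agreement ----

lemma infix_iff_drop_take (t ys : List Char) :
    t <:+: ys ↔ ∃ i : Nat, i + t.length ≤ ys.length ∧ (ys.drop i).take t.length = t := by
  constructor
  · rintro ⟨s, u, rfl⟩
    refine ⟨s.length, by simp, ?_⟩
    rw [List.append_assoc, List.drop_left, List.take_left]
  · rintro ⟨i, _, ht⟩
    have hpre : t <+: ys.drop i := ht ▸ List.take_prefix _ _
    exact hpre.isInfix.trans (List.drop_suffix i ys).isInfix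

lemma drop_take_eq_iff (ys t : List Char) (i : Nat) (h : i + t.length ≤ ys.length) :
    (ys.drop i).take t.length = t ↔ ∀ j, j < t.length → ys[i + j]? = t[j]? := by
  constructor
  · intro h' j hj
    have := congrArg (fun l => l[j]?) h'
    simpa [List.getElem?_take_of_lt hj, List.getElem?_drop] using this
  · intro h'
    apply List.ext_getElem?
    intro n
    by_cases hn : n < t.length
    · rw [List.getElem?_take_of_lt hn, List.getElem?_drop]
      exact h' n hn
    · rw [List.getElem?_eq_none (by simp; omega), List.getElem?_eq_none (by omega)]

-- ---- the heart: substring of the repeated truncated melody = cyclic occurrence ----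

lemma isIn_eq_cyclic (t mel : List Char) (hL : mel ≠ []) (pt : Int) (hpt : 0 < pt) :
    PySem.Chars.isIn t
      (PySem.List.slice
        (PySem.List.pyRepeat mel (-(PySem.Int.floordiv (-pt) (mel.length : Int)))) none (some pt))
    = cyclicOcc t mel pt := by
  set L : Nat := mel.length with hLdef
  have hL1 : 1 ≤ L := by
    cases mel with | nil => simp at hL | cons a r => simp [hLdef]
  set cnt : Int := -(PySem.Int.floordiv (-pt) (L : Int)) with hcnt
  have hceil := (PySem.Int.neg_floordiv_neg_eq_iff_of_pos (a := pt) (b := (L : Int)) (q := cnt)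
    (by exact_mod_cast hL1)).mp rfl
  have hcnt_pos : 0 < cnt := by nlinarith [hceil.1, hceil.2]
  set p : Nat := pt.toNat with hp
  have hpt' : (p : Int) = pt := Int.toNat_of_nonneg hpt.le
  have hRlen : (PySem.List.pyRepeat mel cnt).length = cnt.toNat * L := by
    simp [PySem.List.pyRepeat, hLdef]
  have hple : p ≤ cnt.toNat * L := by
    have h2 : pt ≤ cnt * (L : Int) := hceil.2
    have : (p : Int) ≤ (cnt.toNat : Int) * (L : Int) := by
      rw [hpt', Int.toNat_of_nonneg hcnt_pos.le]; exact h2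
    exact_mod_cast this
  rw [PySem.List.slice_to _ hpt.le, ← hp]
  set R := PySem.List.pyRepeat mel cnt with hR
  have hRget : ∀ x : Nat, x < p → (R.take p)[x]? = mel[x % L]? := by
    intro x hx
    rw [List.getElem?_take_of_lt hx, hR]
    exact flatten_replicate_getElem? mel cnt.toNat x (by simp only [← hLdef]; omega)
  have htakelen : (R.take p).length = p := by
    rw [List.length_take, hRlen]; omega
  rw [Bool.eq_iff_iff, PySem.Chars.isIn_iff_infix]
  unfold cyclicOcc
  rw [List.any_eq_true]
  set k : Nat := t.length with hk
  constructor
  · -- substring occurrence → cyclic offset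
    rintro hinf
    obtain ⟨i0, hlen, htk⟩ := (infix_iff_drop_take t (R.take p)).mp hinf
    rw [htakelen] at hlen
    have hpoint := (drop_take_eq_iff (R.take p) t i0 (by rw [htakelen]; omega)).mp htk
    refine ⟨((i0 % L : Nat) : Int), ?_, ?_⟩
    · rw [PySem.List.mem_pyRange_one]
      have h1 : i0 % L < L := Nat.mod_lt _ (by omega)
      have h2 : i0 % L ≤ i0 := Nat.mod_le _ _
      constructor
      · positivity
      · rw [lt_min_iff]
        constructor
        · exact_mod_cast h1
        · omega
    · rw [List.all_eq_true]
      intro j hj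
      rw [PySem.List.mem_pyRange_one] at hj
      obtain ⟨jN, rfl⟩ : ∃ jN : Nat, j = (jN : Int) := ⟨j.toNat, (Int.toNat_of_nonneg hj.1).symm⟩
      have hjk : jN < k := by exact_mod_cast hj.2
      have hpt2 := hpoint jN hjk
      rw [hRget (i0 + jN) (by omega)] at hpt2
      rw [show ((i0 % L : Nat) : Int) + (jN : Int) = (((i0 % L + jN) : Nat) : Int) by push_cast; ring]
      simp only [PySem.Int.mod_natCast, PySem.List.pyGet?_natCast, beq_iff_eq]
      rw [Nat.mod_add_mod]
      exact hpt2
  · -- cyclic offset → substring occurrence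
    rintro ⟨i, hi, hallb⟩
    rw [PySem.List.mem_pyRange_one] at hi
    obtain ⟨iN, rfl⟩ : ∃ iN : Nat, i = (iN : Int) := ⟨i.toNat, (Int.toNat_of_nonneg hi.1).symm⟩
    rw [lt_min_iff] at hi
    have hiL : iN < L := by exact_mod_cast hi.2.1
    have hik : iN + k ≤ p := by
      have := hi.2.2
      omega
    rw [List.all_eq_true] at hallb
    apply (infix_iff_drop_take t (R.take p)).mpr
    refine ⟨iN, by omega, ?_⟩
    apply (drop_take_eq_iff (R.take p) t iN (by omega)).mpr
    intro j hj
    have hb := hallb (j : Int) (by rw [PySem.List.mem_pyRange_one]; constructor <;> [positivity; exact_mod_cast hj])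
    rw [show ((iN : Int) + (j : Int)) = (((iN + j) : Nat) : Int) by push_cast; ring] at hb
    simp only [PySem.Int.mod_natCast, PySem.List.pyGet?_natCast, beq_iff_eq] at hb
    rw [hRget (iN + j) (by omega)]
    exact hb

-- ---- both loops compute a "first maximum over the matching tracks" ----

-- A's running-max update, applied only at matching tracks
def gsel (st : Option String × Int) (c : Int × String) : Option String × Int :=
  if st.2 < c.1 then (some c.2, c.1) else st

-- B's second-stage selection step (the literal lambda in solution_alt)
def bsel (best cand : Int × String) : Int × String :=
  if best.1 < cand.1 then cand else best

-- the candidate a single musicinfo contributes, phrased with A's containment test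
def matchA (m' : List Char) (info : String) : Option (Int × String) :=
  match (PySem.Str.split? info ",").getD [] with
  | [startT, endT, _name, melody] =>
    let playTime : Int :=
      (PySem.Int.ofChars? (PySem.List.slice endT.toList none (some 2))).getD 0 * 60
      + (PySem.Int.ofChars? (PySem.List.slice endT.toList (some 3) none)).getD 0
      - (PySem.Int.ofChars? (PySem.List.slice startT.toList none (some 2))).getD 0 * 60
      - (PySem.Int.ofChars? (PySem.List.slice startT.toList (some 3) none)).getD 0
    let mel := replaceStepL melody.toList
    let cnt : Int := -(PySem.Int.floordiv (-playTime) (mel.length : Int))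
    let played := PySem.List.slice (PySem.List.pyRepeat mel cnt) none (some playTime)
    if 0 < playTime ∧ PySem.Chars.isIn m' played = true then some (playTime, _name) else none
  | _ => none

-- the same candidate, phrased with B's cyclic test
def matchB (tune : List Char) (info : String) : Option (Int × String) :=
  match (PySem.Str.split? info ",").getD [] with
  | [startT, endT, _name, melody] =>
    let playTime : Int :=
      (PySem.Int.ofChars? (PySem.List.slice endT.toList none (some 2))).getD 0 * 60
      + (PySem.Int.ofChars? (PySem.List.slice endT.toList (some 3) none)).getD 0
      - (PySem.Int.ofChars? (PySem.List.slice startT.toList none (some 2))).getD 0 * 60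
      - (PySem.Int.ofChars? (PySem.List.slice startT.toList (some 3) none)).getD 0
    let mel := normB melody.toList
    if 0 < playTime ∧ cyclicOcc tune mel playTime = true then some (playTime, _name) else none
  | _ => none

lemma matchB_pos (tune : List Char) (info : String) (c : Int × String)
    (h : matchB tune info = some c) : 0 < c.1 := by
  unfold matchB at h
  set ps := (PySem.Str.split? info ",").getD [] with hps
  clear_value ps
  match ps with
  | [] | [_] | [_, _] | [_, _, _] | _ :: _ :: _ :: _ :: _ :: _ => simp at h
  | [s, e, n, mel] =>
    dsimp only at h
    rw [Option.ite_none_right_eq_some, Option.some_inj] at h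
    obtain ⟨hc, rfl⟩ := h
    exact hc.1

lemma stepA_char (m' : List Char) (st : Option String × Int) (hst : 0 ≤ st.2) (info : String) :
    stepA m' st info = (match matchA m' info with | none => st | some c => gsel st c) ∧
      0 ≤ (stepA m' st info).2 := by
  unfold stepA matchA
  set ps := (PySem.Str.split? info ",").getD [] with hps
  clear_value ps
  match ps with
  | [] | [_] | [_, _] | [_, _, _] | _ :: _ :: _ :: _ :: _ :: _ => exact ⟨rfl, hst⟩
  | [s, e, n, mel] =>
    dsimp only
    generalize (PySem.Int.ofChars? (PySem.List.slice e.toList none (some 2))).getD 0 = a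
    generalize (PySem.Int.ofChars? (PySem.List.slice e.toList (some 3) none)).getD 0 = b
    generalize (PySem.Int.ofChars? (PySem.List.slice s.toList none (some 2))).getD 0 = c
    generalize (PySem.Int.ofChars? (PySem.List.slice s.toList (some 3) none)).getD 0 = d
    set pt : Int := a * 60 + b - c * 60 - d with hptdef
    generalize PySem.Chars.isIn m'
        (PySem.List.slice
          (PySem.List.pyRepeat (replaceStepL mel.toList)
            (-(PySem.Int.floordiv (-pt) ((replaceStepL mel.toList).length : Int)))) none (some pt)) = q
    cases q with
    | false =>
      constructor
      · simp
      · simpa using hst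
    | true =>
      by_cases h0 : 0 < pt
      · by_cases hlt : st.2 < pt
        · constructor
          · simp [gsel, hlt, h0]
          · simp [hlt]; omega
        · constructor
          · simp [gsel, hlt, h0]
          · simpa [hlt] using hst
      · have hnd : ¬ (st.2 < pt) := by omega
        constructor
        · simp [hnd, h0]
        · simpa [hnd] using hst

lemma gsel_nonneg (st : Option String × Int) (c : Int × String) (hst : 0 ≤ st.2) :
    0 ≤ (gsel st c).2 := by
  unfold gsel; split_ifs with h
  · simpa using by omega
  · exact hst

lemma foldA_char (m' : List Char) (l : List String) (st : Option String × Int) (hst : 0 ≤ st.2) :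
    l.foldl (stepA m') st = (l.filterMap (matchA m')).foldl gsel st := by
  induction l generalizing st with
  | nil => rfl
  | cons i l ih =>
    rw [List.foldl_cons, List.filterMap_cons]
    obtain ⟨heq, hnn⟩ := stepA_char m' st hst i
    cases h : matchA m' i with
    | none => rw [heq, h]; exact ih _ (h ▸ heq ▸ hnn)
    | some c =>
      rw [heq, h, List.foldl_cons]
      exact ih _ (gsel_nonneg st c hst)

lemma stepM_char (tune : List Char) (acc : List (Int × String)) (info : String) :
    stepM tune acc info = acc ++ (matchB tune info).toList := by
  unfold stepM matchB
  set ps := (PySem.Str.split? info ",").getD [] with hps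
  clear_value ps
  match ps with
  | [] | [_] | [_, _] | [_, _, _] | _ :: _ :: _ :: _ :: _ :: _ => simp
  | [s, e, n, mel] =>
    dsimp only
    generalize (PySem.Int.ofChars? (PySem.List.slice e.toList none (some 2))).getD 0 = a
    generalize (PySem.Int.ofChars? (PySem.List.slice e.toList (some 3) none)).getD 0 = b
    generalize (PySem.Int.ofChars? (PySem.List.slice s.toList none (some 2))).getD 0 = c
    generalize (PySem.Int.ofChars? (PySem.List.slice s.toList (some 3) none)).getD 0 = d
    set pt : Int := a * 60 + b - c * 60 - d with hptdef
    generalize cyclicOcc tune (normB mel.toList) pt = q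
    cases q with
    | false => simp
    | true =>
      by_cases h0 : 0 < pt
      · simp [h0]
      · simp [h0]

lemma foldB_char (tune : List Char) (l : List String) (acc : List (Int × String)) :
    l.foldl (stepM tune) acc = acc ++ l.filterMap (matchB tune) := by
  induction l generalizing acc with
  | nil => simp
  | cons i l ih =>
    rw [List.foldl_cons, stepM_char, ih, List.filterMap_cons, List.append_assoc]
    cases matchB tune i <;> simp

lemma match_agree (m : String) (hm : notesOkB m.toList = true) (info : String)
    (hok : infoOkB info = true) :
    matchA (replaceStepL m.toList) info = matchB (normB m.toList) info := by
  unfold matchA matchB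
  unfold infoOkB at hok
  set ps := (PySem.Str.split? info ",").getD [] with hps
  clear_value ps
  match ps with
  | [] | [_] | [_, _] | [_, _, _] | _ :: _ :: _ :: _ :: _ :: _ => simp at hok
  | [s, e, n, mel] =>
    dsimp only at hok ⊢
    simp only [Bool.and_eq_true, Bool.not_eq_true'] at hok
    obtain ⟨⟨⟨hts, hte⟩, hne⟩, hnotes⟩ := hok
    have hne' : mel ≠ "" := by simpa using hne
    have hmelL : mel.toList ≠ [] := by
      intro hcon
      exact hne' (by
        have h2 : mel.toList = "".toList := by simpa using hcon
        exact String.toList_inj.mp h2)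
    have hmel : replaceStepL mel.toList = normB mel.toList := chain_eq_normB _ hnotes
    have hm' : replaceStepL m.toList = normB m.toList := chain_eq_normB _ hm
    have hnn : normB mel.toList ≠ [] := by
      cases h : mel.toList with
      | nil => exact absurd h hmelL
      | cons a r => exact normB_ne_nil a r
    set pt : Int :=
      (PySem.Int.ofChars? (PySem.List.slice e.toList none (some 2))).getD 0 * 60
      + (PySem.Int.ofChars? (PySem.List.slice e.toList (some 3) none)).getD 0
      - (PySem.Int.ofChars? (PySem.List.slice s.toList none (some 2))).getD 0 * 60
      - (PySem.Int.ofChars? (PySem.List.slice s.toList (some 3) none)).getD 0 with hptdef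
    by_cases h0 : 0 < pt
    · rw [hmel, hm']
      rw [isIn_eq_cyclic (normB m.toList) (normB mel.toList) hnn pt h0]
    · simp [h0]

lemma foldg_some (t : List (Int × String)) (b : Int × String) :
    t.foldl gsel (some b.2, b.1) = (some (t.foldl bsel b).2, (t.foldl bsel b).1) := by
  induction t generalizing b with
  | nil => rfl
  | cons x t ih =>
    rw [List.foldl_cons, List.foldl_cons,
      show gsel (some b.2, b.1) x = (some (bsel b x).2, (bsel b x).1) from by
        unfold gsel bsel; split_ifs <;> rfl]
    exact ih (bsel b x)

-- ===== VERDICT (by name: the statement is the Claim_ definition above) =====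
theorem solution_spec : Claim_equal_solution := by
  intro m musicinfos _ hpre
  obtain ⟨hm', hall⟩ := hpre
  unfold Spec_solution solution solution_alt
  rcases hm' with rfl | hm
  · rfl
  have hl : ∀ i ∈ musicinfos, infoOkB i = true := fun i hi => List.all_eq_true.mp hall i hi
  rw [foldA_char _ _ _ (by norm_num), foldB_char, List.nil_append]
  rw [List.filterMap_congr (fun i hi => match_agree m hm i (hl i hi))]
  have hpos : ∀ x ∈ musicinfos.filterMap (matchB (normB m.toList)), 0 < x.1 := by
    intro x hx
    obtain ⟨i, _, hmi⟩ := List.mem_filterMap.mp hx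
    exact matchB_pos _ i x hmi
  set c := musicinfos.filterMap (matchB (normB m.toList)) with hc
  clear_value c
  cases c with
  | nil => rfl
  | cons h t =>
    rw [List.foldl_cons,
      show gsel ((none : Option String), (0 : Int)) h = (some h.2, h.1) from by
        unfold gsel; rw [if_pos]; exact hpos h (List.mem_cons_self),
      foldg_some]
    rfl
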